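-- pv_equiv track=rewrite | github.com/paulwalger/my_advent_of_code | 2021/day_13/main.py | get_dots_after_foldings
-- ===== SOURCE A (Python) =====
-- def is_y_axis(axis):
--     return axis == "y"
--
-- def is_x_axis(axis):
--     return axis == "x"
--
-- def symetric(x, y, axis, value):
--     if is_y_axis(axis):
--         if y > value:
--             y = value - abs(y - value)
--     elif is_x_axis(axis):
--         if x > value:
--             x = value - abs(x - value)
--     return (x, y)
--
-- def get_dots_after_foldings(dots, folds):
--     for fold_axis, fold_value in folds:
--         new_dots = set()
--         for dot in dots:
--             new_dot = symetric(*dot, fold_axis, fold_value)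
--             new_dots.add(new_dot)
--         dots = new_dots.copy()
--     return dots
-- ===== SOURCE B (Python) =====
-- def reflect(dot, fold):
--     x, y = dot
--     axis, value = fold
--     if axis == "y":
--         if y > value:
--             y = value - abs(y - value)
--     elif axis == "x":
--         if x > value:
--             x = value - abs(x - value)
--     return (x, y)
--
--
-- def final_position(dot, folds):
--     if not folds:
--         return dot
--     return final_position(reflect(dot, folds[0]), folds[1:])
--
--
-- def get_dots_after_foldings(dots, folds):
--     if not folds:
--         return dots
--     return {final_position(dot, folds) for dot in dots}
-- ===== Notes on version B (the rewrite author's own statement) =====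
-- stated objective: alternative
-- what changed: Instead of rebuilding a deduplicated set after every fold, B composes the whole fold sequence per dot (recursively) and builds one final set comprehension; with no folds it returns the input unchanged like A.
import Mathlib
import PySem

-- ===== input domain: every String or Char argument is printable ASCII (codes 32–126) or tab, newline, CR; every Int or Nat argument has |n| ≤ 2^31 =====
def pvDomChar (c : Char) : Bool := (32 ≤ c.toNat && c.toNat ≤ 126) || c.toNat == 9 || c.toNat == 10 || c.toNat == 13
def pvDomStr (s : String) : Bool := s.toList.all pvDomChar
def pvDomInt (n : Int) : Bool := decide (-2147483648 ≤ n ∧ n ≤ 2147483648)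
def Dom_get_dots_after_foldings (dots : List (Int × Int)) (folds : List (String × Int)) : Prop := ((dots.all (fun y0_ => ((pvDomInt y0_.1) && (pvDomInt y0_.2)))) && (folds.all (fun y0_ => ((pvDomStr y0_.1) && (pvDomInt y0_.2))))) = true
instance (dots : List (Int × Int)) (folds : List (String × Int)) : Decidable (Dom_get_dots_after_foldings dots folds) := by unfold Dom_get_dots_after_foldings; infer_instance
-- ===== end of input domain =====

-- B composes the whole fold sequence per dot and builds one final set, instead of
-- rebuilding a deduplicated set after every fold (objective: alternative decomposition).

-- ===== PORT A =====
def is_y_axis (axis : String) : Bool := axis == "y"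

def is_x_axis (axis : String) : Bool := axis == "x"

def symetric (x y : Int) (axis : String) (value : Int) : Int × Int :=
  if is_y_axis axis then
    if y > value then (x, value - |y - value|) else (x, y)
  else if is_x_axis axis then
    if x > value then (value - |x - value|, y) else (x, y)
  else (x, y)

def get_dots_after_foldings (dots : List (Int × Int)) (folds : List (String × Int)) : List (Int × Int) :=
  folds.foldl (fun dots fold =>
    dots.foldl (fun new_dots dot => PySem.Set.add new_dots (symetric dot.1 dot.2 fold.1 fold.2))
      PySem.Set.empty) dots

-- ===== PORT B =====
def reflect (dot : Int × Int) (fold : String × Int) : Int × Int :=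
  if fold.1 == "y" then
    if dot.2 > fold.2 then (dot.1, fold.2 - |dot.2 - fold.2|) else dot
  else if fold.1 == "x" then
    if dot.1 > fold.2 then (fold.2 - |dot.1 - fold.2|, dot.2) else dot
  else dot

def final_position (dot : Int × Int) : List (String × Int) → Int × Int
  | [] => dot
  | f :: fs => final_position (reflect dot f) fs

def get_dots_after_foldings_alt (dots : List (Int × Int)) (folds : List (String × Int)) : List (Int × Int) :=
  if folds.isEmpty then dots
  else PySem.Set.ofList (dots.map (fun d => final_position d folds))

-- ===== PRECONDITION & SPEC =====
def Spec_get_dots_after_foldings (dots : List (Int × Int)) (folds : List (String × Int)) (out : List (Int × Int)) : Prop := out = get_dots_after_foldings_alt dots folds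
instance (dots : List (Int × Int)) (folds : List (String × Int)) (out : List (Int × Int)) : Decidable (Spec_get_dots_after_foldings dots folds out) := by unfold Spec_get_dots_after_foldings; infer_instance

-- ===== CLAIM (what is proved, stated in full; the proofs are below) =====
def Claim_equal_get_dots_after_foldings : Prop := ∀ (dots : List (Int × Int)) (folds : List (String × Int)), Dom_get_dots_after_foldings dots folds → Spec_get_dots_after_foldings dots folds (get_dots_after_foldings dots folds)

-- ===== LEMMAS AND PROOFS =====

theorem symetric_eq_reflect (d : Int × Int) (f : String × Int) :
    symetric d.1 d.2 f.1 f.2 = reflect d f := by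
  cases d; cases f
  simp only [symetric, reflect, is_y_axis, is_x_axis]

-- one inner loop of A builds the set of the images under this fold's reflection
theorem innerA_eq_ofList_map (l : List (Int × Int)) (f : String × Int) :
    l.foldl (fun nd d => PySem.Set.add nd (symetric d.1 d.2 f.1 f.2)) PySem.Set.empty
      = PySem.Set.ofList (l.map (fun d => reflect d f)) := by
  rw [PySem.Set.ofList_eq_foldl, List.foldl_map]
  simp only [symetric_eq_reflect]
  rfl

theorem update_append {α : Type} [BEq α] (t a b : List α) :
    PySem.Set.update t (a ++ b) = PySem.Set.update (PySem.Set.update t a) b := by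
  simp [PySem.Set.update, List.foldl_append]

theorem update_of_subset {α : Type} [BEq α] [LawfulBEq α] (t ys : List α)
    (h : ∀ y ∈ ys, y ∈ t) : PySem.Set.update t ys = t := by
  induction ys generalizing t with
  | nil => rfl
  | cons y ys ih =>
      show PySem.Set.update (PySem.Set.add t y) ys = t
      rw [PySem.Set.add_of_mem (h y (by simp))]
      exact ih t (fun z hz => h z (by simp [hz]))

theorem foldl_add_prefix {α : Type} [BEq α] [LawfulBEq α] (l s : List α) :
    ∃ r, l.foldl PySem.Set.add s = s ++ r := by
  induction l generalizing s with
  | nil => exact ⟨[], (List.append_nil s).symm⟩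
  | cons x l ih =>
      show ∃ r, List.foldl PySem.Set.add (PySem.Set.add s x) l = s ++ r
      by_cases hx : x ∈ s
      · rw [PySem.Set.add_of_mem hx]
        exact ih s
      · rw [PySem.Set.add_of_not_mem hx]
        obtain ⟨r, hr⟩ := ih (s ++ [x])
        exact ⟨x :: r, by simpa [List.append_assoc] using hr⟩

-- dedup-first-occurrence commutes with the per-element image
theorem update_map_foldl_add {α β : Type} [BEq α] [LawfulBEq α] [BEq β] [LawfulBEq β]
    (g : α → β) (l : List α) (s : List α) (t : List β)
    (h : ∀ x ∈ s, g x ∈ t) :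
    PySem.Set.update t ((l.foldl PySem.Set.add s).map g)
      = PySem.Set.update t (l.map g) := by
  induction l generalizing s t with
  | nil => exact update_of_subset t _ (by simpa using h)
  | cons x l ih =>
      show PySem.Set.update t ((l.foldl PySem.Set.add (PySem.Set.add s x)).map g)
          = PySem.Set.update t (g x :: l.map g)
      by_cases hx : x ∈ s
      · rw [PySem.Set.add_of_mem hx]
        calc PySem.Set.update t ((l.foldl PySem.Set.add s).map g)
            = PySem.Set.update t (l.map g) := ih s t h
          _ = PySem.Set.update (PySem.Set.add t (g x)) (l.map g) := by
              rw [PySem.Set.add_of_mem (h x hx)]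
          _ = PySem.Set.update t (g x :: l.map g) := rfl
      · rw [PySem.Set.add_of_not_mem hx]
        have h' : ∀ z ∈ s ++ [x], g z ∈ PySem.Set.add t (g x) := by
          intro z hz
          rcases List.mem_append.1 hz with hz | hz
          · exact (PySem.Set.mem_add _ _ _).2 (Or.inl (h z hz))
          · simp only [List.mem_singleton] at hz
            subst hz
            exact (PySem.Set.mem_add _ _ _).2 (Or.inr rfl)
        obtain ⟨r, hr⟩ := foldl_add_prefix l (PySem.Set.add s x)
        rw [PySem.Set.add_of_not_mem hx] at hr
        have himg : ∀ y ∈ s.map g, y ∈ t := by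
          intro y hy
          obtain ⟨z, hz, rfl⟩ := List.mem_map.1 hy
          exact h z hz
        have himg' : ∀ y ∈ s.map g, y ∈ PySem.Set.add t (g x) := fun y hy =>
          (PySem.Set.mem_add _ _ _).2 (Or.inl (himg y hy))
        have hgx : PySem.Set.add (PySem.Set.add t (g x)) (g x) = PySem.Set.add t (g x) :=
          PySem.Set.add_of_mem ((PySem.Set.mem_add _ _ _).2 (Or.inr rfl))
        calc PySem.Set.update t ((l.foldl PySem.Set.add (s ++ [x])).map g)
            = PySem.Set.update t (s.map g ++ (g x :: r.map g)) := by
              rw [hr]; simp [List.append_assoc]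
          _ = PySem.Set.update (PySem.Set.update t (s.map g)) (g x :: r.map g) :=
              update_append t (s.map g) (g x :: r.map g)
          _ = PySem.Set.update t (g x :: r.map g) := by
              rw [update_of_subset t (s.map g) himg]
          _ = PySem.Set.update (PySem.Set.add t (g x)) (r.map g) := rfl
          _ = PySem.Set.update (PySem.Set.update (PySem.Set.add t (g x)) (s.map g))
                (g x :: r.map g) := by
              rw [update_of_subset _ (s.map g) himg']
              show _ = PySem.Set.update (PySem.Set.add (PySem.Set.add t (g x)) (g x)) (r.map g)
              rw [hgx]
          _ = PySem.Set.update (PySem.Set.add t (g x)) (s.map g ++ (g x :: r.map g)) :=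
              (update_append _ (s.map g) (g x :: r.map g)).symm
          _ = PySem.Set.update (PySem.Set.add t (g x))
                ((l.foldl PySem.Set.add (s ++ [x])).map g) := by
              rw [hr]; simp [List.append_assoc]
          _ = PySem.Set.update (PySem.Set.add t (g x)) (l.map g) := ih _ _ h'
          _ = PySem.Set.update t (g x :: l.map g) := rfl

theorem ofList_map_ofList {α β : Type} [BEq α] [LawfulBEq α] [BEq β] [LawfulBEq β]
    (g : α → β) (l : List α) :
    PySem.Set.ofList ((PySem.Set.ofList l).map g) = PySem.Set.ofList (l.map g) := by
  rw [PySem.Set.ofList_eq_foldl (xs := l)]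
  exact update_map_foldl_add g l [] [] (by simp)

theorem foldA_ofList (fs : List (String × Int)) (l : List (Int × Int)) :
    fs.foldl (fun dots fold =>
        dots.foldl (fun nd d => PySem.Set.add nd (symetric d.1 d.2 fold.1 fold.2))
          PySem.Set.empty)
      (PySem.Set.ofList l)
      = PySem.Set.ofList (l.map (fun d => final_position d fs)) := by
  induction fs generalizing l with
  | nil => simp [final_position]
  | cons f fs ih =>
      rw [List.foldl_cons, innerA_eq_ofList_map, ofList_map_ofList, ih]
      simp only [List.map_map, Function.comp_def, final_position]

-- ===== VERDICT (by name: the statement is the Claim_ definition above) =====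
theorem get_dots_after_foldings_spec : Claim_equal_get_dots_after_foldings := by
  intro dots folds _
  unfold Spec_get_dots_after_foldings get_dots_after_foldings get_dots_after_foldings_alt
  cases folds with
  | nil => rfl
  | cons f fs =>
      rw [List.foldl_cons, innerA_eq_ofList_map, foldA_ofList]
      simp [List.map_map, Function.comp_def, final_position]
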